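-- pv_equiv track=rewrite | github.com/dmed256/coding-puzzles | 2020/07.py | find_bag_contents
-- ===== SOURCE A (Python) =====
-- def find_bag_contents(bag, deps, bags):
--     if bag in bags:
--         return bags[bag]
--
--     contents = {}
--     for count, inner_bag in deps[bag]:
--         contents[inner_bag] = (
--             contents.get(inner_bag, 0)
--             + count
--         )
--         for inner_inner_bag, inner_inner_count in find_bag_contents(inner_bag, deps, bags).items():
--             contents[inner_inner_bag] = (
--                 contents.get(inner_inner_bag, 0)
--                 + (count * inner_inner_count)
--             )
--
--     bags[bag] = contents
--     return contents
-- ===== SOURCE B (Python) =====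
-- def find_bag_contents(bag, deps, bags):
--     # Iterative explicit-stack machine replacing the recursion; same bags-cache
--     # updates in the same order, same return value.
--     if bag in bags:
--         return bags[bag]
--     frames = [(bag, list(deps[bag]), {}, 0)]
--     ret = None
--     while frames:
--         b, rest, contents, pc = frames.pop()
--         if ret is not None:
--             for k, v in ret.items():
--                 contents[k] = contents.get(k, 0) + pc * v
--             ret = None
--         if not rest:
--             bags[b] = contents
--             ret = contents
--             continue
--         (count, inner), rest = rest[0], rest[1:]
--         contents[inner] = contents.get(inner, 0) + count
--         if inner in bags:
--             for k, v in bags[inner].items():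
--                 contents[k] = contents.get(k, 0) + count * v
--             frames.append((b, rest, contents, pc))
--         else:
--             frames.append((b, rest, contents, count))
--             frames.append((inner, list(deps[inner]), {}, 0))
--     return ret
-- ===== Notes on version B (the rewrite author's own statement) =====
-- stated objective: alternative
-- what changed: A's recursive memoized DFS is replaced by an iterative explicit-stack machine whose frames hold (bag, remaining children, partial contents, pending multiplier), producing the same contents dicts and the same bags-cache updates in the same order.
import Mathlib
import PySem

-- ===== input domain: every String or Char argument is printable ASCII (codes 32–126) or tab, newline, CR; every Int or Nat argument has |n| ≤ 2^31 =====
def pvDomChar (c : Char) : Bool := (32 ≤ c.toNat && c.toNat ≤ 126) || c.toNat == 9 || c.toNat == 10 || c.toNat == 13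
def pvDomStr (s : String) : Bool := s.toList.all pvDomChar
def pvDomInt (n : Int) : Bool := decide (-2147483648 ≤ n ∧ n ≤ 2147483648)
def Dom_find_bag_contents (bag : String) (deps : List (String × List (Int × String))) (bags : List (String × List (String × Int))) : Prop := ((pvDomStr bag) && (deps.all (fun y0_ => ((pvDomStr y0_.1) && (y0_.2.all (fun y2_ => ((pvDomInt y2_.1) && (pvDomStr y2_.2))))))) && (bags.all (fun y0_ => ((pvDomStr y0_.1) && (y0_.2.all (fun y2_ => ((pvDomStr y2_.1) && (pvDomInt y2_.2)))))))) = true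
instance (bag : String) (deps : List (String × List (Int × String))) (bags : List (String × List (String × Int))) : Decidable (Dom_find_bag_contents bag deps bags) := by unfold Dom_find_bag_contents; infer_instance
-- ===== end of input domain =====

-- B replaces A's recursive memoized DFS by an iterative explicit-stack machine; both mutate
-- the Python `bags` cache identically (same entries in the same order); equivalence proved here
-- is about the return value.

-- ---- shared dict helpers (Python dict ops on the association-list arguments, via PySem.Dict) ----
def fbcGet? {ν : Type} (s : List (String × ν)) (k : String) : Option ν :=
  (PySem.Dict.mk s).get? k
def fbcInsert {ν : Type} (s : List (String × ν)) (k : String) (v : ν) : List (String × ν) :=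
  ((PySem.Dict.mk s).insert k v).items
-- contents[k] = contents.get(k, 0) + v
def fbcAdd (c : List (String × Int)) (k : String) (v : Int) : List (String × Int) :=
  fbcInsert c k (((fbcGet? c k).getD 0) + v)
-- for k, v in ic.items(): contents[k] = contents.get(k, 0) + count * v
def fbcMerge (c : List (String × Int)) (count : Int) (ic : List (String × Int)) : List (String × Int) :=
  ic.foldl (fun acc q => fbcAdd acc q.1 (count * q.2)) c
-- deps[b]  (Python raises KeyError when b is missing — those inputs are outside Pre_)
def fbcDeps (deps : List (String × List (Int × String))) (b : String) : List (Int × String) :=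
  (fbcGet? deps b).getD []
-- total number of dependency entries (used for the fuel guards of both ports)
def fbcEtot (deps : List (String × List (Int × String))) : Nat :=
  deps.foldr (fun p a => p.2.length + a) 0

-- ===== PORT A =====
-- the body of A's for-loop over deps[bag] (`recv` is the recursive call); `none` = fuel ran out
def fbcLoopA (recv : String → List (String × List (String × Int)) → Option ((List (String × Int)) × List (String × List (String × Int)))) :
    List (Int × String) → List (String × Int) → List (String × List (String × Int)) →
    Option ((List (String × Int)) × List (String × List (String × Int)))
  | [], c, s => some (c, s)
  | (count, inner) :: rest, c, s =>
    match recv inner s with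
    | none => none
    | some (ic, s') => fbcLoopA recv rest (fbcMerge (fbcAdd c inner count) count ic) s'

-- A's recursion, with a depth-fuel guard for totality (never exhausted on Pre_ inputs)
def fbcGoA (deps : List (String × List (Int × String))) :
    Nat → String → List (String × List (String × Int)) →
    Option ((List (String × Int)) × List (String × List (String × Int)))
  | fuel, b, s =>
    match fbcGet? s b with
    | some c => some (c, s)
    | none =>
      match fuel with
      | 0 => none
      | g + 1 =>
        match fbcLoopA (fun x t => fbcGoA deps g x t) (fbcDeps deps b) [] s with
        | none => none
        | some (c, s') => some (c, fbcInsert s' b c)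

def find_bag_contents (bag : String) (deps : List (String × List (Int × String))) (bags : List (String × List (String × Int))) : List (String × Int) :=
  match fbcGoA deps (deps.length + fbcEtot deps + 2) bag bags with
  | some (c, _) => c
  | none => []

-- ===== PORT B =====
-- one stack frame of the machine: (fuel guard, bag, remaining children, partial contents, pending multiplier)
structure BFrame where
  fuel : Nat
  bag : String
  rest : List (Int × String)
  contents : List (String × Int)
  pc : Int

-- merge a just-returned child result `r` into the popped frame's contents
def fbcMergeRet (c : List (String × Int)) (pc : Int) (r : Option (List (String × Int))) : List (String × Int) :=
  match r with
  | none => c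
  | some ret => fbcMerge c pc ret

-- termination measure for the machine (weights frames by their fuel guard)
def fbcPhi (B : Nat) : List BFrame → Nat
  | [] => 0
  | fr :: K => B ^ fr.fuel * (fr.rest.length + 1) + fbcPhi B K

theorem fbcDeps_length_le (deps : List (String × List (Int × String))) (b : String) :
    (fbcDeps deps b).length ≤ fbcEtot deps := by
  induction deps with
  | nil => simp [fbcDeps, fbcGet?, fbcEtot, PySem.Dict.get?]
  | cons p rest ih =>
    simp only [fbcDeps, fbcGet?, fbcEtot] at *
    rw [PySem.Dict.get?_mk_cons]
    by_cases h : p.1 == b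
    · simp [h]
    · simp only [h, Bool.false_eq_true, if_false, List.foldr_cons]
      exact ih.trans (Nat.le_add_left _ _)

-- the while-loop of B: pop a frame, merge a returned result, then finish / handle one child
def fbcRunB (deps : List (String × List (Int × String))) :
    List BFrame → Option (List (String × Int)) → List (String × List (String × Int)) →
    Option (List (String × Int))
  | [], r, _ => r
  | ⟨f, b, frest, cont, pc⟩ :: K, r, s =>
    let c := fbcMergeRet cont pc r
    match frest with
    | [] => fbcRunB deps K (some c) (fbcInsert s b c)
    | (count, inner) :: rest' =>
      let c' := fbcAdd c inner count
      match fbcGet? s inner with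
      | some ic =>
        fbcRunB deps (⟨f, b, rest', fbcMerge c' count ic, pc⟩ :: K) none s
      | none =>
        match f with
        | 0 => none
        | g + 1 =>
          fbcRunB deps (⟨g, inner, fbcDeps deps inner, [], 0⟩ :: ⟨g + 1, b, rest', c', count⟩ :: K) none s
  termination_by frames r s => fbcPhi (fbcEtot deps + 2) frames
  decreasing_by
  · simp only [fbcPhi, List.length_nil]
    have h1 : 0 < (fbcEtot deps + 2) ^ f * (0 + 1) := Nat.mul_pos (Nat.pow_pos (by omega)) (by omega)
    omega
  · simp only [fbcPhi, List.length_cons]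
    have h1 : (fbcEtot deps + 2) ^ f * (rest'.length + 1) < (fbcEtot deps + 2) ^ f * (rest'.length + 1 + 1) :=
      (Nat.mul_lt_mul_left (Nat.pow_pos (by omega))).mpr (by omega)
    omega
  · simp only [fbcPhi, List.length_cons, Nat.succ_eq_add_one]
    have hlen : (fbcDeps deps inner).length ≤ fbcEtot deps := fbcDeps_length_le deps inner
    have hp : (fbcEtot deps + 2) ^ g * ((fbcDeps deps inner).length + 1) < (fbcEtot deps + 2) ^ (g + 1) := by
      calc (fbcEtot deps + 2) ^ g * ((fbcDeps deps inner).length + 1)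
          < (fbcEtot deps + 2) ^ g * (fbcEtot deps + 2) :=
            (Nat.mul_lt_mul_left (Nat.pow_pos (by omega))).mpr (by omega)
        _ = (fbcEtot deps + 2) ^ (g + 1) := by ring
    have h3 : (fbcEtot deps + 2) ^ (g + 1) * (rest'.length + 1 + 1)
        = (fbcEtot deps + 2) ^ (g + 1) * (rest'.length + 1) + (fbcEtot deps + 2) ^ (g + 1) := by ring
    omega

def find_bag_contents_alt (bag : String) (deps : List (String × List (Int × String))) (bags : List (String × List (String × Int))) : List (String × Int) :=
  match fbcGet? bags bag with
  | some c => c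
  | none =>
    match fbcRunB deps [⟨deps.length + fbcEtot deps + 1, bag, fbcDeps deps bag, [], 0⟩] none bags with
    | some c => c
    | none => []

-- ===== PRECONDITION & SPEC =====
-- successor nodes of x in the dependency graph, stopping at bags-cached nodes
def fbcSucc (deps : List (String × List (Int × String))) (bags : List (String × List (String × Int))) (x : String) : List String :=
  match fbcGet? bags x with
  | some _ => []
  | none => (fbcDeps deps x).map (·.2)

-- bounded reachability closure (enough iterations to reach every node)
def fbcReach (deps : List (String × List (Int × String))) (bags : List (String × List (String × Int))) (init : List String) : List String :=
  (List.range (fbcEtot deps + 2)).foldl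
    (fun R _ => R ++ ((R.flatMap (fbcSucc deps bags)).eraseDups.filter (fun x => ¬ x ∈ R))) init

-- Pre_ holds exactly when Python A returns normally: every bag reachable from `bag` (stopping at
-- bags-cached nodes) is cached or a key of deps (else A raises KeyError), and the reachable
-- uncached subgraph is acyclic (else A raises RecursionError).
def Pre_find_bag_contents (bag : String) (deps : List (String × List (Int × String))) (bags : List (String × List (String × Int))) : Prop :=
  (∀ x ∈ fbcReach deps bags [bag], (fbcGet? bags x).isSome ∨ (fbcGet? deps x).isSome) ∧
  (∀ x ∈ fbcReach deps bags [bag], (fbcGet? bags x).isNone → ¬ x ∈ fbcReach deps bags (fbcSucc deps bags x))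
instance (bag : String) (deps : List (String × List (Int × String))) (bags : List (String × List (String × Int))) : Decidable (Pre_find_bag_contents bag deps bags) := by unfold Pre_find_bag_contents; infer_instance

def pvWitness_find_bag_contents : String × (List (String × List (Int × String))) × (List (String × List (String × Int))) :=
  ("a", [("a", [(2, "b")]), ("b", [])], [])

def Spec_find_bag_contents (bag : String) (deps : List (String × List (Int × String))) (bags : List (String × List (String × Int))) (out : List (String × Int)) : Prop := out = find_bag_contents_alt bag deps bags
instance (bag : String) (deps : List (String × List (Int × String))) (bags : List (String × List (String × Int))) (out : List (String × Int)) : Decidable (Spec_find_bag_contents bag deps bags out) := by unfold Spec_find_bag_contents; infer_instance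

-- ===== CLAIM (what is proved, stated in full; the proofs are below) =====
def Claim_equal_find_bag_contents : Prop := ∀ (bag : String) (deps : List (String × List (Int × String))) (bags : List (String × List (String × Int))), Dom_find_bag_contents bag deps bags → Pre_find_bag_contents bag deps bags → Spec_find_bag_contents bag deps bags (find_bag_contents bag deps bags)

-- ===== LEMMAS AND PROOFS =====

-- machine/recursion simulation: running the machine on a frame for `b` with fuel `f` is exactly
-- A's loop over the frame's remaining children with depth fuel `f`, followed by the cache insert
-- and the continuation.
theorem fbcML (deps : List (String × List (Int × String))) :
    ∀ (f : Nat) (rest : List (Int × String)) (b : String) (K : List BFrame)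
      (r : Option (List (String × Int))) (s : List (String × List (String × Int)))
      (cont : List (String × Int)) (pc : Int),
      fbcRunB deps (⟨f, b, rest, cont, pc⟩ :: K) r s =
        match fbcLoopA (fun x t => fbcGoA deps f x t) rest (fbcMergeRet cont pc r) s with
        | none => none
        | some (c, s') => fbcRunB deps K (some c) (fbcInsert s' b c) := by
  intro f
  induction f using Nat.strong_induction_on with
  | _ f IHf =>
    intro rest
    induction rest with
    | nil =>
      intro b K r s cont pc
      rw [fbcRunB.eq_def]
      simp [fbcLoopA]
    | cons hd tl IHtl =>
      intro b K r s cont pc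
      obtain ⟨count, inner⟩ := hd
      rw [fbcRunB.eq_def]
      simp only [fbcLoopA]
      cases hg : fbcGet? s inner with
      | some ic =>
        simp only []
        rw [IHtl]
        have : fbcGoA deps f inner s = some (ic, s) := by
          rw [fbcGoA.eq_def]; simp [hg]
        rw [this]
        simp [fbcMergeRet]
      | none =>
        cases f with
        | zero =>
          simp only []
          have : fbcGoA deps 0 inner s = none := by rw [fbcGoA.eq_def]; simp [hg]
          rw [this]
        | succ g =>
          simp only []
          rw [IHf g (Nat.lt_succ_self g)]
          have hgo : fbcGoA deps (g + 1) inner s =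
              match fbcLoopA (fun x t => fbcGoA deps g x t) (fbcDeps deps inner) [] s with
              | none => none
              | some (c, s') => some (c, fbcInsert s' inner c) := by
            rw [fbcGoA.eq_def]; simp [hg]
          rw [hgo]
          simp only [fbcMergeRet]
          cases hl : fbcLoopA (fun x t => fbcGoA deps g x t) (fbcDeps deps inner) [] s with
          | none => simp
          | some p =>
            obtain ⟨ci, si⟩ := p
            simp only []
            rw [IHtl]
            simp [fbcMergeRet]

-- ===== VERDICT (by name: the statement is the Claim_ definition above) =====
theorem find_bag_contents_spec : Claim_equal_find_bag_contents := by
  intro bag deps bags _ _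
  unfold Spec_find_bag_contents find_bag_contents find_bag_contents_alt
  cases hb : fbcGet? bags bag with
  | some c =>
    have : fbcGoA deps (deps.length + fbcEtot deps + 2) bag bags = some (c, bags) := by
      rw [fbcGoA.eq_def]; simp [hb]
    rw [this]
  | none =>
    rw [fbcML]
    have hgo : fbcGoA deps (deps.length + fbcEtot deps + 2) bag bags =
        match fbcLoopA (fun x t => fbcGoA deps (deps.length + fbcEtot deps + 1) x t) (fbcDeps deps bag) [] bags with
        | none => none
        | some (c, s') => some (c, fbcInsert s' bag c) := by
      rw [show deps.length + fbcEtot deps + 2 = (deps.length + fbcEtot deps + 1) + 1 from rfl]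
      rw [fbcGoA.eq_def]; simp [hb]
    rw [hgo]
    simp only [fbcMergeRet]
    cases hl : fbcLoopA (fun x t => fbcGoA deps (deps.length + fbcEtot deps + 1) x t) (fbcDeps deps bag) [] bags with
    | none => simp
    | some p =>
      obtain ⟨c, s'⟩ := p
      simp [fbcRunB.eq_def]
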